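-- pv_equiv track=rewrite | github.com/harisaryono/YOUTUBE | update_latest_channel_videos.py | build_provider_rotation
-- ===== SOURCE A (Python) =====
-- def build_provider_rotation(provider_models: list[tuple[str, str]], start_index: int) -> list[tuple[int, str, str]]:
--     if not provider_models:
--         return []
--     ordered: list[tuple[int, str, int]] = []
--     total = len(provider_models)
--     for offset in range(total):
--         idx = (start_index + offset) % total
--         provider, model_name = provider_models[idx]
--         ordered.append((idx, provider, model_name))
--     return ordered
-- ===== SOURCE B (Python) =====
-- def build_provider_rotation(provider_models: list[tuple[str, str]], start_index: int) -> list[tuple[int, str, str]]: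
--     total = len(provider_models)
--     if total == 0:
--         return []
--     s = start_index % total
--     # Scatter pass: walk the list once in ORIGINAL order and write each
--     # indexed entry directly into its destination slot of a preallocated
--     # result (the inverse permutation of A's gather), instead of gathering
--     # source indices in output order.
--     res = [None] * total
--     for j, (provider, model_name) in enumerate(provider_models):
--         res[(j - s) % total] = (j, provider, model_name)
--     return res
-- ===== Notes on version B (the rewrite author's own statement) =====
-- stated objective: alternative
-- what changed: A gathers: it iterates over output positions and computes the source index (start+offset) % total for each; B scatters: it walks the input once in original order and writes each indexed entry into its destination slot (j - start%total) % total of a preallocated result array (the inverse permutation).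
import Mathlib
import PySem

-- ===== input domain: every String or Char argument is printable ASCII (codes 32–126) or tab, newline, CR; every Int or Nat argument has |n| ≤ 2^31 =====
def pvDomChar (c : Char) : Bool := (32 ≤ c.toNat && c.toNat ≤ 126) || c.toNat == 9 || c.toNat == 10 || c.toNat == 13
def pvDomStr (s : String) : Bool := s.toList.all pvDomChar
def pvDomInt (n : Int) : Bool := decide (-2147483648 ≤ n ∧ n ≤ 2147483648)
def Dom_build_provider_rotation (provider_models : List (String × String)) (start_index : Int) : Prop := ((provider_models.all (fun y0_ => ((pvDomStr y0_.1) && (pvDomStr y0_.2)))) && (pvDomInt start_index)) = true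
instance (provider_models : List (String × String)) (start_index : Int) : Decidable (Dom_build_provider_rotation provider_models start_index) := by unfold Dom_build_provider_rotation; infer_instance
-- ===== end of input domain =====

-- B replaces A's gather (per output position, fetch provider_models[(start+offset) % total])
-- by a scatter: one pass over the input in original order writing each indexed entry into
-- its destination slot of a preallocated result (alternative decomposition, same cost).

-- ===== PORT A =====
def build_provider_rotation (provider_models : List (String × String)) (start_index : Int) : List (Int × String × String) :=
  if provider_models = [] then []
  else
    let total : Int := provider_models.length
    (PySem.List.pyRange 0 total 1).foldl
      (fun ordered offset =>
        ordered ++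
          (let idx := PySem.Int.mod (start_index + offset) total
           match PySem.List.pyGet? provider_models idx with
           | some pm => [(idx, pm.1, pm.2)]
           | none => []))   -- none = IndexError; unreachable since 0 ≤ idx < total
      []

-- ===== PORT B =====
def build_provider_rotation_alt (provider_models : List (String × String)) (start_index : Int) : List (Int × String × String) :=
  let total : Int := provider_models.length
  if total = 0 then []
  else
    let s : Int := PySem.Int.mod start_index total
    let res : List (Option (Int × String × String)) := List.replicate total.toNat none
    let final := (PySem.List.enumerate provider_models 0).foldl
      (fun r jv => PySem.List.pySetD r (PySem.Int.mod (jv.1 - s) total) (some (jv.1, jv.2.1, jv.2.2))) res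
    -- Python returns res itself: every slot was written exactly once, so no None remains;
    -- extracting the written values is the identity on this result.
    final.filterMap id

-- ===== PRECONDITION & SPEC =====
def Spec_build_provider_rotation (provider_models : List (String × String)) (start_index : Int) (out : List (Int × String × String)) : Prop := out = build_provider_rotation_alt provider_models start_index
instance (provider_models : List (String × String)) (start_index : Int) (out : List (Int × String × String)) : Decidable (Spec_build_provider_rotation provider_models start_index out) := by unfold Spec_build_provider_rotation; infer_instance

-- ===== CLAIM (what is proved, stated in full; the proofs are below) =====
def Claim_equal_build_provider_rotation : Prop := ∀ (provider_models : List (String × String)) (start_index : Int), Dom_build_provider_rotation provider_models start_index → Spec_build_provider_rotation provider_models start_index (build_provider_rotation provider_models start_index)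

-- ===== LEMMAS AND PROOFS =====

-- canonical gather form, over Nat indices
def pvGath (pm : List (String × String)) (j : Nat) : Int × String × String :=
  ((j : Int), (pm.getD j default).1, (pm.getD j default).2)

-- scatter fold: length is preserved
theorem pvScatter_length {β γ : Type} (posf : β → Nat) (valf : β → γ)
    (ws : List β) (init : List (Option γ)) :
    (ws.foldl (fun r w => r.set (posf w) (some (valf w))) init).length = init.length := by
  induction ws generalizing init with
  | nil => rfl
  | cons w ws ih => simp [List.foldl_cons, ih]

-- scatter fold: a position no write targets keeps its initial value
theorem pvScatter_untouched {β γ : Type} (posf : β → Nat) (valf : β → γ)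
    (ws : List β) (init : List (Option γ)) (k : Nat)
    (h : ∀ w ∈ ws, posf w ≠ k) :
    (ws.foldl (fun r w => r.set (posf w) (some (valf w))) init)[k]? = init[k]? := by
  induction ws generalizing init with
  | nil => rfl
  | cons w ws ih =>
    rw [List.foldl_cons, ih _ (fun w hw => h w (List.mem_cons_of_mem _ hw)),
      List.getElem?_set_ne (h w (List.mem_cons_self))]

-- scatter fold with pairwise-distinct positions: the slot a write targets holds its value
theorem pvScatter_hit {β γ : Type} (posf : β → Nat) (valf : β → γ)
    (ws : List β) (init : List (Option γ)) (w : β)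
    (hnd : (ws.map posf).Nodup) (hw : w ∈ ws) (hk : posf w < init.length) :
    (ws.foldl (fun r w => r.set (posf w) (some (valf w))) init)[posf w]? = some (some (valf w)) := by
  induction ws generalizing init with
  | nil => cases hw
  | cons w0 ws ih =>
    rw [List.map_cons, List.nodup_cons] at hnd
    rcases List.mem_cons.mp hw with h0 | h0
    · subst h0
      rw [List.foldl_cons, pvScatter_untouched _ _ _ _ _
          (fun w' hw' he => hnd.1 (by rw [← he]; exact List.mem_map_of_mem (f := posf) hw')),
        List.getElem?_set_self (by simpa using hk)]
    · rw [List.foldl_cons]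
      exact ih _ hnd.2 h0 (by simpa using hk)

-- A's output is the gather list: output position k holds entry (start+k) % n
-- pySetD with a nonnegative index is List.set
theorem pvFold_setD_eq_set {β γ : Type} (posI : β → Int) (valf : β → γ)
    (ws : List β) (init : List (Option γ)) (h : ∀ w ∈ ws, 0 ≤ posI w) :
    ws.foldl (fun r w => PySem.List.pySetD r (posI w) (some (valf w))) init
      = ws.foldl (fun r w => r.set (posI w).toNat (some (valf w))) init := by
  induction ws generalizing init with
  | nil => rfl
  | cons w ws ih =>
    rw [List.foldl_cons, List.foldl_cons,
      PySem.List.pySetD_of_nonneg init _ (h w (List.mem_cons_self)),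
      ih _ (fun w' hw' => h w' (List.mem_cons_of_mem _ hw'))]

-- flatMap of singletons is map
theorem pvFlatMap_single {α β : Type} (l : List α) (f : α → β) :
    l.flatMap (fun x => [f x]) = l.map f := by
  induction l with
  | nil => rfl
  | cons a l ih => simp [ih]

theorem pvA_eq (pm : List (String × String)) (start : Int) (h : pm ≠ []) :
    build_provider_rotation pm start =
      (List.range pm.length).map (fun k : Nat => pvGath pm (((start + (k : Int)) % (pm.length : Int)).toNat)) := by
  have hn : 0 < (pm.length : Int) := by
    exact_mod_cast List.length_pos_iff.mpr h
  unfold build_provider_rotation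
  rw [if_neg h]
  rw [PySem.List.foldl_append_eq_flatMap, List.nil_append,
    PySem.List.pyRange_one 0 pm.length, List.flatMap_map]
  have hlen : ((pm.length : Int) - 0).toNat = pm.length := by omega
  rw [hlen]
  refine Eq.trans (List.flatMap_congr ?_) (pvFlatMap_single _ _)
  intro k hk
  show (match PySem.List.pyGet? pm (PySem.Int.mod (start + ((0 : Int) + (k : Int))) (pm.length : Int)) with
        | some p => [(PySem.Int.mod (start + ((0 : Int) + (k : Int))) (pm.length : Int), p.1, p.2)]
        | none => ([] : List (Int × String × String)))
      = [pvGath pm (((start + (k : Int)) % (pm.length : Int)).toNat)]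
  have hmod : PySem.Int.mod (start + ((0 : Int) + (k : Int))) (pm.length : Int)
      = (start + (k : Int)) % (pm.length : Int) := by
    rw [PySem.Int.mod_eq_emod_of_pos hn]; ring_nf
  have h0 : 0 ≤ (start + (k : Int)) % (pm.length : Int) := Int.emod_nonneg _ (by omega)
  have h1 : (start + (k : Int)) % (pm.length : Int) < pm.length := Int.emod_lt_of_pos _ hn
  set j : Nat := ((start + (k : Int)) % (pm.length : Int)).toNat with hj
  have hcast : (start + (k : Int)) % (pm.length : Int) = (j : Int) := by omega
  have hlt : j < pm.length := by omega
  have hget : PySem.List.pyGet? pm ((start + (k : Int)) % (pm.length : Int))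
      = some (pm.getD j default) := by
    rw [hcast, PySem.List.pyGet?_natCast, List.getElem?_eq_getElem hlt,
      List.getD_eq_getElem pm default hlt]
  rw [hmod, hget, hcast]
  rfl

theorem pvB_eq (pm : List (String × String)) (start : Int) (h : pm ≠ []) :
    build_provider_rotation_alt pm start =
      (List.range pm.length).map (fun k : Nat => pvGath pm (((start + (k : Int)) % (pm.length : Int)).toNat)) := by
  have hn : 0 < (pm.length : Int) := by
    exact_mod_cast List.length_pos_iff.mpr h
  have hne : ¬ ((pm.length : Int) = 0) := by omega
  unfold build_provider_rotation_alt
  simp only [if_neg hne]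
  set n : Nat := pm.length with hnn
  set s : Int := PySem.Int.mod start (n : Int) with hs
  have hsemod : s = start % (n : Int) := PySem.Int.mod_eq_emod_of_pos hn
  have hs0 : 0 ≤ s := by rw [hsemod]; exact Int.emod_nonneg _ (by omega)
  have hs1 : s < (n : Int) := by rw [hsemod]; exact Int.emod_lt_of_pos _ hn
  -- the fold writes via List.set (the destination index is nonnegative)
  have hfold := pvFold_setD_eq_set
    (posI := fun jv : Int × String × String => PySem.Int.mod (jv.1 - s) (n : Int))
    (valf := fun jv : Int × String × String => (jv.1, jv.2.1, jv.2.2))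
    (PySem.List.enumerate pm 0) (List.replicate ((n : Int)).toNat none)
    (by
      intro jv _
      show 0 ≤ PySem.Int.mod (jv.1 - s) (n : Int)
      rw [PySem.Int.mod_eq_emod_of_pos hn]
      exact Int.emod_nonneg _ (by omega))
  set s' : Nat := s.toNat with hs'
  have hscast : s = (s' : Int) := by omega
  have hs'n : s' < n := by omega
  -- abbreviations for the scatter
  set posf : Int × String × String → Nat :=
    fun jv => (PySem.Int.mod (jv.1 - s) (n : Int)).toNat with hposf
  set valf : Int × String × String → Int × String × String :=
    fun jv => (jv.1, jv.2.1, jv.2.2) with hvalf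
  set g : Nat → Int × String × String :=
    fun k => pvGath pm (((start + (k : Int)) % ((n : Int))).toNat) with hg
  have hmodn : ∀ a : Int, PySem.Int.mod a (n : Int) = a % (n : Int) := fun a =>
    PySem.Int.mod_eq_emod_of_pos hn
  -- the scatter positions are pairwise distinct
  have hnd : ((PySem.List.enumerate pm 0).map posf).Nodup := by
    have hinj : ∀ x ∈ List.range n, ∀ y ∈ List.range n,
        posf ((0 : Int) + (x : Int), pm.getD x default) = posf ((0 : Int) + (y : Int), pm.getD y default) → x = y := by
      intro x hx y hy hxy
      rw [List.mem_range] at hx hy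
      simp only [hposf, hmodn] at hxy
      have h0x : 0 ≤ ((0 : Int) + (x : Int) - s) % (n : Int) := Int.emod_nonneg _ (by omega)
      have h0y : 0 ≤ ((0 : Int) + (y : Int) - s) % (n : Int) := Int.emod_nonneg _ (by omega)
      have hxe : ((0 : Int) + (x : Int) - s) % (n : Int) = ((0 : Int) + (y : Int) - s) % (n : Int) := by omega
      have hz : (((0 : Int) + (x : Int) - s) - ((0 : Int) + (y : Int) - s)) % (n : Int) = 0 :=
        Int.emod_eq_emod_iff_emod_sub_eq_zero.mp hxe
      have hdvd : (n : Int) ∣ ((x : Int) - (y : Int)) := by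
        have := Int.dvd_of_emod_eq_zero hz
        have he : (((0 : Int) + (x : Int) - s) - ((0 : Int) + (y : Int) - s)) = (x : Int) - (y : Int) := by ring
        rwa [he] at this
      have habs : (x : Int) - (y : Int) = 0 :=
        Int.eq_zero_of_abs_lt_dvd hdvd (abs_lt.mpr ⟨by omega, by omega⟩)
      omega
    have : (PySem.List.enumerate pm 0).map posf
        = (List.range n).map (fun k : Nat => posf ((0 : Int) + (k : Int), pm.getD k default)) := by
      refine List.ext_getElem (by simp [PySem.List.length_enumerate, hnn]) ?_
      intro i h1 h2
      have hi : i < n := by simpa using h2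
      have hi' : i < pm.length := by omega
      simp only [List.getElem_map, List.getElem_range]
      congr 1
      rw [PySem.List.getElem_enumerate]
      · simp [List.getElem?_eq_getElem hi']
    rw [this]
    exact (List.nodup_range).map_on hinj
  -- the scattered result, slot by slot
  have hfin : (PySem.List.enumerate pm 0).foldl
      (fun r w => r.set (posf w) (some (valf w)))
      (List.replicate ((n : Int)).toNat none)
      = ((List.range n).map g).map some := by
    have hlenrep : (List.replicate ((n : Int)).toNat (none : Option (Int × String × String))).length = n := by
      simp
    refine List.ext_getElem? (fun k => ?_)
    by_cases hk : k < n
    · -- the unique write hitting slot k comes from source index j = (s' + k) % n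
      set j : Nat := (s' + k) % n with hj
      have hjlt : j < n := Nat.mod_lt _ (by omega)
      have hjlt' : j < pm.length := by omega
      set w0 : Int × String × String := ((j : Int), pm.getD j default) with hw0
      have hwmem : w0 ∈ PySem.List.enumerate pm 0 := by
        rw [PySem.List.mem_enumerate_iff]
        exact ⟨j, hjlt', by simp [hw0, List.getElem?_eq_getElem hjlt']⟩
      have hpos : posf w0 = k := by
        simp only [hposf, hw0, hmodn]
        have hjc : (j : Int) = ((s' : Int) + (k : Int)) % (n : Int) := by
          rw [hj]; push_cast; rfl
        have : ((j : Int) - (s' : Int)) % (n : Int) = (k : Int) := by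
          rw [hjc, Int.sub_emod, Int.emod_emod_of_dvd _ dvd_rfl, ← Int.sub_emod,
            add_sub_cancel_left]
          exact Int.emod_eq_of_lt (by omega) (by omega)
        rw [← hscast] at hjc
        rw [hscast, this]
        omega
      have hkfin : posf w0 < (List.replicate ((n : Int)).toNat (none : Option (Int × String × String))).length := by
        rw [hpos, hlenrep]; omega
      have hhit := pvScatter_hit posf valf (PySem.List.enumerate pm 0)
        (List.replicate ((n : Int)).toNat none) w0 hnd hwmem hkfin
      rw [hpos] at hhit
      rw [hhit]
      have harg : ((start + (k : Int)) % (n : Int)).toNat = j := by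
        have hms : start % (n : Int) = (s' : Int) % (n : Int) := by
          rw [← hsemod, hscast, Int.emod_eq_of_lt (by omega) (by omega)]
        have h1 : (start + (k : Int)) % (n : Int) = ((s' : Int) + (k : Int)) % (n : Int) :=
          Int.ModEq.add_right _ hms
        have h2 : ((s' : Int) + (k : Int)) % (n : Int) = (j : Int) := by
          rw [hj]; push_cast; rfl
        omega
      have hval : valf w0 = g k := by
        simp only [hvalf, hw0, hg, pvGath, harg]
      simp [hval, hk]
    · -- past the end: both sides are none
      have hlfold : ((PySem.List.enumerate pm 0).foldl
          (fun r w => r.set (posf w) (some (valf w)))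
          (List.replicate ((n : Int)).toNat none)).length = n := by
        rw [pvScatter_length, hlenrep]
      rw [List.getElem?_eq_none (by rw [hlfold]; omega),
        List.getElem?_eq_none (by simp; omega)]
  have hid : List.filterMap id (((List.range n).map g).map some) = (List.range n).map g := by
    rw [List.filterMap_map]
    simp
  exact (congrArg (List.filterMap id) (hfold.trans hfin)).trans hid
-- ===== VERDICT (by name: the statement is the Claim_ definition above) =====
theorem build_provider_rotation_spec : Claim_equal_build_provider_rotation := by
  intro pm start _
  unfold Spec_build_provider_rotation
  by_cases h : pm = []
  · subst h; rfl
  · rw [pvA_eq pm start h, pvB_eq pm start h]
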